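-- pv_equiv track=rewrite | github.com/backsung75/Yatcht_game | Yatcht_Game/code/calcFunctions.py | tcard
-- ===== SOURCE A (Python) =====
-- def tcard(diceNumList):
--     l_ = [int(i) for i in diceNumList]
--     value = 0
--     for i in l_:
--         if l_.count(i) >= 3:
--             value = sum(l_)
--             break
--     return str(value)
-- ===== SOURCE B (Python) =====
-- def tcard(diceNumList):
--     nums = sorted(int(i) for i in diceNumList)
--     value = 0
--     for a, b in zip(nums, nums[2:]):
--         if a == b:
--             value = sum(nums)
--             break
--     return str(value)
-- ===== Notes on version B (the rewrite author's own statement) =====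
-- stated objective: faster
-- what changed: B sorts the dice and scans a single sliding window for two equal values at distance 2 (in a sorted list exactly a three-of-a-kind), eliminating counting entirely; A rescans the list with list.count per element.
import Mathlib
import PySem

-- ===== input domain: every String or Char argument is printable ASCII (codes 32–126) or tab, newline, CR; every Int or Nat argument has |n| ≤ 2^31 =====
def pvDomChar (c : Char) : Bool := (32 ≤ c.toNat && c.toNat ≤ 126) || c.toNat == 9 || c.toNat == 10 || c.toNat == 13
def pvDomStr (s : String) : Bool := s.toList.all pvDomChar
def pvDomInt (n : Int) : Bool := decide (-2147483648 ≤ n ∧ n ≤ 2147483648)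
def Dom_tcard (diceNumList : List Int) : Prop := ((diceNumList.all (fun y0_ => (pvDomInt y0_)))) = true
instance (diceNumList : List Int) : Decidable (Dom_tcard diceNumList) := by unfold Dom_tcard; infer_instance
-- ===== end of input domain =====

-- B re-implements tcard by sorting the dice and scanning one sliding window for equal values
-- at distance 2 (in a sorted list, exactly a three-of-a-kind) instead of A's per-element list.count rescan.

-- ===== PORT A =====
-- A's for-loop with break: first element whose count in l_ is >= 3 sets value = sum and stops.
def tcardLoop (l : List Int) : List Int → Int
  | [] => 0
  | i :: rest => if l.count i ≥ 3 then l.sum else tcardLoop l rest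

def tcard (diceNumList : List Int) : String :=
  let l_ := diceNumList
  PySem.Int.toStr (tcardLoop l_ l_)

-- ===== PORT B =====
-- B's for-loop over zip(nums, nums[2:]) with break: a == b at distance 2 in the sorted list.
def tcardWin : List (Int × Int) → Bool
  | [] => false
  | (a, b) :: rest => if a == b then true else tcardWin rest

def tcard_alt (diceNumList : List Int) : String :=
  let nums := PySem.List.sorted diceNumList (fun x => x) false
  let value : Int := if tcardWin (nums.zip (PySem.List.slice nums (some 2) none)) then nums.sum else 0
  PySem.Int.toStr value

-- ===== PRECONDITION & SPEC =====
def Spec_tcard (diceNumList : List Int) (out : String) : Prop := out = tcard_alt diceNumList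
instance (diceNumList : List Int) (out : String) : Decidable (Spec_tcard diceNumList out) := by unfold Spec_tcard; infer_instance

-- ===== CLAIM (what is proved, stated in full; the proofs are below) =====
def Claim_equal_tcard : Prop := ∀ (diceNumList : List Int), Dom_tcard diceNumList → Spec_tcard diceNumList (tcard diceNumList)

-- ===== LEMMAS AND PROOFS =====

theorem tcardLoop_eq_if (l rest : List Int) :
    tcardLoop l rest = if rest.any (fun i => decide (l.count i ≥ 3)) then l.sum else 0 := by
  induction rest with
  | nil => simp [tcardLoop]
  | cons i r ih =>
    simp only [tcardLoop, List.any_cons, ih]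
    by_cases h : l.count i ≥ 3 <;> simp [h]

-- proof-side reformulation of the sliding-window test
def win3 : List Int → Bool
  | a :: b :: c :: r => (a == c) || win3 (b :: c :: r)
  | _ => false

theorem tcardWin_eq_win3 : ∀ s : List Int, tcardWin (s.zip (s.drop 2)) = win3 s
  | [] => rfl
  | [_] => rfl
  | [_, _] => rfl
  | a :: b :: c :: r => by
    have ih := tcardWin_eq_win3 (b :: c :: r)
    simp only [List.drop, List.zip_cons_cons, tcardWin, win3]
    rw [show (b :: c :: r).zip r = (b :: c :: r).zip ((b :: c :: r).drop 2) from rfl, ih]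
    by_cases h : a = c <;> simp [h]

-- In a ≤-sorted list, an equal pair at distance 2 exists iff some value has count ≥ 3.
theorem win3_iff_count : ∀ s : List Int, s.Pairwise (· ≤ ·) →
    ((win3 s = true) ↔ (∃ x, 3 ≤ s.count x))
  | [] => by simp [win3]
  | [a] => by
    intro _
    simp only [win3, Bool.false_eq_true, false_iff, not_exists]
    intro x
    by_cases h : a = x <;> simp [h]
  | [a, b] => by
    intro _
    simp only [win3, Bool.false_eq_true, false_iff, not_exists]
    intro x
    by_cases ha : a = x <;> by_cases hb : b = x <;> simp [ha, hb]
  | a :: b :: c :: r => by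
    intro hs
    obtain ⟨ha, ht⟩ := List.pairwise_cons.mp hs
    obtain ⟨hb, ht2⟩ := List.pairwise_cons.mp ht
    obtain ⟨hc, _⟩ := List.pairwise_cons.mp ht2
    have hab : a ≤ b := ha _ (by simp)
    have hac : a ≤ c := ha _ (by simp)
    have hbc : b ≤ c := hb _ (by simp)
    have htail := win3_iff_count (b :: c :: r) ht
    simp only [win3, Bool.or_eq_true, beq_iff_eq]
    constructor
    · rintro (h1 | h2)
      · -- a = c, hence a = b = c : count a ≥ 3
        subst h1
        have hb' : b = a := le_antisymm (hbc) hab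
        refine ⟨a, ?_⟩
        simp [hb']
      · obtain ⟨x, hx⟩ := htail.mp h2
        refine ⟨x, le_trans hx ?_⟩
        simp [List.count_cons]
    · rintro ⟨x, hx⟩
      by_cases hxa : x = a
      · subst hxa
        by_cases hca : x = c
        · exact Or.inl hca
        · exfalso
          have hxc : x < c := lt_of_le_of_ne hac hca
          have h0 : (c :: r).count x = 0 := by
            apply List.count_eq_zero.mpr
            intro hmem
            rcases List.mem_cons.mp hmem with h | h
            · exact hca h
            · have : c ≤ x := hc x h
              omega
          have hsplit : (x :: b :: c :: r).count x
              = (if x = x then 1 else 0) + (if b = x then 1 else 0) + (c :: r).count x := by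
            simp [List.count_cons]
            omega
          rw [hsplit, h0] at hx
          split_ifs at hx <;> omega
      · refine Or.inr (htail.mpr ⟨x, ?_⟩)
        have : (a :: b :: c :: r).count x = (b :: c :: r).count x := by
          simp [List.count_cons, Ne.symm hxa]
        omega

-- ===== VERDICT (by name: the statement is the Claim_ definition above) =====
theorem tcard_spec : Claim_equal_tcard := by
  intro l _
  show tcard l = tcard_alt l
  simp only [tcard, tcard_alt]
  rw [tcardLoop_eq_if]
  set s := PySem.List.sorted l (fun x => x) false with hsdef
  have hperm : s.Perm l := PySem.List.sorted_perm l (fun x => x) false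
  have hpw : s.Pairwise (· ≤ ·) := by
    simpa using PySem.List.sorted_pairwise (xs := l) (key := fun x => x)
  have hslice : PySem.List.slice s (some 2) none = s.drop 2 :=
    PySem.List.slice_from_natCast s 2
  rw [hslice, tcardWin_eq_win3]
  have hsum : s.sum = l.sum := hperm.sum_eq
  have hA : l.any (fun i => decide (l.count i ≥ 3)) = true ↔ ∃ x, 3 ≤ s.count x := by
    simp only [List.any_eq_true, decide_eq_true_eq]
    constructor
    · rintro ⟨x, _, h⟩; exact ⟨x, by rw [hperm.count_eq]; omega⟩
    · rintro ⟨x, h⟩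
      rw [hperm.count_eq] at h
      exact ⟨x, List.count_pos_iff.mp (by omega), by omega⟩
  have hB := win3_iff_count s hpw
  by_cases h : ∃ x, 3 ≤ s.count x
  · rw [if_pos (hA.mpr h), if_pos (hB.mpr h), hsum]
  · rw [if_neg (fun hc => h (hA.mp hc)), if_neg (fun hc => h (hB.mp hc))]
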